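-- pv_equiv track=rewrite | github.com/thetunr/Scatella | phylogeny.py | kmerdistance
-- ===== SOURCE A (Python) =====
-- from collections import Counter
--
-- def kmerdistance(k, x, y):
--   # Step 1: Extract k-mers from each string
--   def get_kmers(s, k):
--       """Generate all k-mers from the input string s."""
--       return [s[i:i+k] for i in range(len(s) - k + 1)]
--
--   # Generate k-mers for both strings
--   kmers_x = get_kmers(x, k)
--   kmers_y = get_kmers(y, k)
--
--   # Step 2: Count occurrences of each k-mer
--   count_x = Counter(kmers_x)
--   count_y = Counter(kmers_y)
--
--   # Step 3: Compute shared k-mers (intersection of k-mers in x and y)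
--   shared_kmers = sum((count_x & count_y).values())  # Intersection counts
--
--   # Step 4: Compute total unique k-mers across both strings
--   total_kmers_x = sum(count_x.values())
--   total_kmers_y = sum(count_y.values())
--
--   # Total k-mers in both sequences
--   total_kmers = total_kmers_x + total_kmers_y
--
--   # Step 5: Compute the k-mer distance score
--   # Distance score = total kmers - 2 * shared kmers
--   score = total_kmers - 2 * shared_kmers
--
--   return score
-- ===== SOURCE B (Python) =====
-- def kmerdistance(k, x, y):
--   # One signed count table: +1 for x's k-mers, -1 for y's; distance = sum of |net|.
--   net = {}
--   for i in range(len(x) - k + 1):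
--     w = x[i:i+k]
--     net[w] = net.get(w, 0) + 1
--   for i in range(len(y) - k + 1):
--     w = y[i:i+k]
--     net[w] = net.get(w, 0) - 1
--   return sum(abs(v) for v in net.values())
-- ===== Notes on version B (the rewrite author's own statement) =====
-- stated objective: simpler
-- what changed: Replaces the two Counters, the Counter intersection and the total-minus-twice-shared arithmetic by one signed difference table (+1 for x's k-mers, -1 for y's) whose absolute values are summed, using the identity cx+cy-2*min(cx,cy)=|cx-cy|.
import Mathlib
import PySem

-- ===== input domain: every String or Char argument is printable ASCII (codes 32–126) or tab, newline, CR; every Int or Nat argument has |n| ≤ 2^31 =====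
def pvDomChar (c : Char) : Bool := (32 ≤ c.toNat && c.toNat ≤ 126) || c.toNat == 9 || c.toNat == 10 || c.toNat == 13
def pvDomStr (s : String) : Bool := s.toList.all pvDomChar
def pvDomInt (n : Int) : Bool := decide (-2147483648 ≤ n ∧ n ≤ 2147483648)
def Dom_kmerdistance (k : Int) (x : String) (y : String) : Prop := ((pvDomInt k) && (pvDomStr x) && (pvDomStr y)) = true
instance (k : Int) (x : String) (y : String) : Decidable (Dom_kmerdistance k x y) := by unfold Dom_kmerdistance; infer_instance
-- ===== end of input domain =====

-- B keeps one signed difference table (+1 for x's k-mers, -1 for y's) and returns the sum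
-- of its absolute values, instead of A's two Counters, Counter intersection and
-- total - 2*shared arithmetic; objective: simpler (same cost).

-- ===== PORT A =====
-- A's helper get_kmers: [s[i:i+k] for i in range(len(s) - k + 1)]
def pvGetKmers (s : List Char) (k : Int) : List (List Char) :=
  (PySem.List.pyRange 0 ((s.length : Int) - k + 1) 1).map
    (fun i => PySem.List.slice s (some i) (some (i + k)))

def kmerdistance (k : Int) (x : String) (y : String) : Int :=
  let kmersX := pvGetKmers x.toList k
  let kmersY := pvGetKmers y.toList k
  let countX := PySem.Dict.counter kmersX
  let countY := PySem.Dict.counter kmersY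
  let interXY := countX.items.foldl
    (fun (d : PySem.Dict (List Char) Int) p =>
      if 0 < min p.2 (countY.getD p.1 0) then d.insert p.1 (min p.2 (countY.getD p.1 0)) else d)
    PySem.Dict.empty
  let shared := interXY.values.foldl (· + ·) 0
  let totalX := countX.values.foldl (· + ·) 0
  let totalY := countY.values.foldl (· + ·) 0
  let total := totalX + totalY
  total - 2 * shared

-- ===== PORT B =====
def kmerdistance_alt (k : Int) (x : String) (y : String) : Int :=
  let net1 := (PySem.List.pyRange 0 ((x.toList.length : Int) - k + 1) 1).foldl
    (fun (d : PySem.Dict (List Char) Int) i =>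
      d.modify (PySem.List.slice x.toList (some i) (some (i + k))) 0 (· + 1)) PySem.Dict.empty
  let net := (PySem.List.pyRange 0 ((y.toList.length : Int) - k + 1) 1).foldl
    (fun (d : PySem.Dict (List Char) Int) i =>
      d.modify (PySem.List.slice y.toList (some i) (some (i + k))) 0 (· - 1)) net1
  net.values.foldl (fun a v => a + |v|) 0

-- ===== PRECONDITION & SPEC =====
def Spec_kmerdistance (k : Int) (x : String) (y : String) (out : Int) : Prop := out = kmerdistance_alt k x y
instance (k : Int) (x : String) (y : String) (out : Int) : Decidable (Spec_kmerdistance k x y out) := by unfold Spec_kmerdistance; infer_instance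

-- ===== CLAIM (what is proved, stated in full; the proofs are below) =====
def Claim_equal_kmerdistance : Prop := ∀ (k : Int) (x : String) (y : String), Dom_kmerdistance k x y → Spec_kmerdistance k x y (kmerdistance k x y)

-- ===== LEMMAS AND PROOFS =====

theorem kmer_sum_indicator {κ : Type} [DecidableEq κ] (D : List κ) (a : κ)
    (hnd : D.Nodup) (ha : a ∈ D) :
    (D.map (fun w => if w = a then (1 : Int) else 0)).sum = 1 := by
  induction D with
  | nil => cases ha
  | cons b D ih =>
    rcases List.nodup_cons.mp hnd with ⟨hb, hnd'⟩
    rcases List.mem_cons.mp ha with h | h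
    · subst h
      have h0 : (D.map (fun w => if w = a then (1 : Int) else 0)).sum = 0 := by
        apply List.sum_eq_zero
        intro z hz
        rcases List.mem_map.mp hz with ⟨u, hu, rfl⟩
        simp [show u ≠ a from fun e => hb (e ▸ hu)]
      simp [h0]
    · have hba : b ≠ a := fun e => hb (e ▸ h)
      simp [hba, ih hnd' h]

theorem kmer_sum_count {κ : Type} [BEq κ] [LawfulBEq κ] [DecidableEq κ] (L D : List κ)
    (hnd : D.Nodup) (hcov : ∀ w ∈ L, w ∈ D) :
    (D.map (fun w => (L.count w : Int))).sum = L.length := by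
  induction L with
  | nil => simp
  | cons a L ih =>
    have hsplit : (D.map (fun w => ((a :: L).count w : Int))).sum =
        (D.map (fun w => (L.count w : Int))).sum +
        (D.map (fun w => if w = a then (1 : Int) else 0)).sum := by
      rw [← List.sum_map_add]
      congr 1
      apply List.map_congr_left
      intro w _
      rw [List.count_cons]
      by_cases h : w = a
      · simp [h]
      · simp [h]
        exact fun e => h e.symm
    rw [hsplit, ih (fun w hw => hcov w (List.mem_cons_of_mem _ hw)),
        kmer_sum_indicator D a hnd (hcov a (List.mem_cons_self))]
    simp

theorem kmer_getD_sub {κ : Type} [BEq κ] [LawfulBEq κ] [DecidableEq κ] :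
    ∀ (l : List κ) (d : PySem.Dict κ Int) (v : κ),
    (l.foldl (fun d x => d.modify x 0 (· - 1)) d).getD v 0 = d.getD v 0 - l.count v := by
  intro l
  induction l with
  | nil => simp
  | cons x l ih =>
    intro d v
    rw [List.foldl_cons, ih, PySem.Dict.getD_modify, List.count_cons]
    by_cases h : v = x
    · simp [h]; ring
    · simp [h]; exact fun e => h e.symm

theorem kmer_inter_sum {κ : Type} [BEq κ] [LawfulBEq κ] (g : κ → Int) :
    ∀ (ps : List (κ × Int)) (d : PySem.Dict κ Int),
    (ps.map Prod.fst).Nodup → (∀ p ∈ ps, d.contains p.1 = false) →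
    ((ps.foldl (fun d p =>
        if 0 < min p.2 (g p.1) then d.insert p.1 (min p.2 (g p.1)) else d) d).values).sum =
      d.values.sum + (ps.map (fun p => max 0 (min p.2 (g p.1)))).sum := by
  intro ps
  induction ps with
  | nil => simp
  | cons p ps ih =>
    intro d hnd hfresh
    rw [List.map_cons] at hnd
    rcases List.nodup_cons.mp hnd with ⟨hp, hnd'⟩
    rw [List.foldl_cons]
    by_cases hm : 0 < min p.2 (g p.1)
    · have hfresh' : ∀ q ∈ ps, (d.insert p.1 (min p.2 (g p.1))).contains q.1 = false := by
        intro q hq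
        rw [PySem.Dict.contains_insert]
        have hne : q.1 ≠ p.1 := fun e => hp (e ▸ List.mem_map_of_mem hq)
        simp [hne, hfresh q (List.mem_cons_of_mem _ hq)]
      have hvals : (d.insert p.1 (min p.2 (g p.1))).values = d.values ++ [min p.2 (g p.1)] := by
        unfold PySem.Dict.values
        rw [PySem.Dict.items_insert_of_not_contains _ _ (hfresh p List.mem_cons_self)]
        simp
      rw [if_pos hm, ih _ hnd' hfresh', hvals, List.sum_append, List.map_cons, List.sum_cons,
          max_eq_right (le_of_lt hm)]
      simp
      ring
    · rw [if_neg hm, ih _ hnd' (fun q hq => hfresh q (List.mem_cons_of_mem _ hq)),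
          List.map_cons, List.sum_cons, max_eq_left (not_lt.mp hm)]
      ring

theorem kmer_abs_sum {κ : Type} (f g : κ → Int) :
    ∀ (D : List κ),
    (D.map (fun w => |f w - g w|)).sum =
      (D.map f).sum + (D.map g).sum - 2 * (D.map (fun w => min (f w) (g w))).sum := by
  intro D
  induction D with
  | nil => simp
  | cons w D ih =>
    have hpt : |f w - g w| = f w + g w - 2 * min (f w) (g w) := by
      rcases le_total (f w) (g w) with h | h
      · rw [abs_of_nonpos (by omega), min_eq_left h]; ring
      · rw [abs_of_nonneg (by omega), min_eq_right h]; ring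
    simp only [List.map_cons, List.sum_cons, ih, hpt]
    ring

-- A's value equals B's value on every input
theorem kmer_main (k : Int) (x : String) (y : String) :
    kmerdistance k x y = kmerdistance_alt k x y := by
  unfold kmerdistance kmerdistance_alt
  dsimp only
  set Lx := pvGetKmers x.toList k with hLx
  set Ly := pvGetKmers y.toList k with hLy
  -- identify B's two folds
  have hnet1 : (PySem.List.pyRange 0 ((x.toList.length : Int) - k + 1) 1).foldl
      (fun (d : PySem.Dict (List Char) Int) i =>
        d.modify (PySem.List.slice x.toList (some i) (some (i + k))) 0 (· + 1)) PySem.Dict.empty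
      = PySem.Dict.counter Lx := by
    rw [PySem.Dict.counter_eq_foldl, hLx, pvGetKmers, List.foldl_map]
  have hnet : (PySem.List.pyRange 0 ((y.toList.length : Int) - k + 1) 1).foldl
      (fun (d : PySem.Dict (List Char) Int) i =>
        d.modify (PySem.List.slice y.toList (some i) (some (i + k))) 0 (· - 1))
        (PySem.Dict.counter Lx)
      = Ly.foldl (fun d w => d.modify w 0 (· - 1)) (PySem.Dict.counter Lx) := by
    rw [hLy, pvGetKmers, List.foldl_map]
  rw [hnet1, hnet]
  set net := Ly.foldl (fun d w => d.modify w 0 (· - 1)) (PySem.Dict.counter Lx) with hnetdef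
  -- key sets
  set Kx := PySem.Set.ofList Lx with hKx
  have hKxnd : Kx.Nodup := PySem.Set.nodup_ofList Lx
  have hkeysnet : net.keys = Kx.update Ly := by
    rw [hnetdef]
    have := PySem.Dict.keys_foldl_modify Ly (0 : Int) (fun _ _ => (· - 1)) (PySem.Dict.counter Lx)
    simpa [PySem.Dict.keys_counter] using this
  have hnetnd : net.keys.Nodup := by
    rw [hkeysnet]; exact PySem.Set.nodup_update Kx Ly hKxnd
  -- B as a sum over net.keys
  rw [show (fun (a v : Int) => a + |v|) = (fun a v => a + (fun t => |t|) v) from rfl]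
  rw [PySem.List.foldl_add net.values (fun t => |t|) 0,
      PySem.Dict.values_eq_map_keys net hnetnd 0, List.map_map]
  have hgetD : ∀ w, net.getD w 0 = (Lx.count w : Int) - (Ly.count w : Int) := by
    intro w
    rw [hnetdef, kmer_getD_sub, PySem.Dict.getD_counter]
  have hmapB : net.keys.map ((fun t => |t|) ∘ fun w => net.getD w 0)
      = net.keys.map (fun w => |(Lx.count w : Int) - (Ly.count w : Int)|) := by
    apply List.map_congr_left
    intro w _
    simp [hgetD w]
  rw [hmapB, kmer_abs_sum (fun w => (Lx.count w : Int)) (fun w => (Ly.count w : Int)) net.keys]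
  -- A's totals
  have htotal : ∀ (L : List (List Char)),
      (PySem.Dict.counter L).values.foldl (· + ·) 0 = (L.length : Int) := by
    intro L
    rw [show (fun (a v : Int) => a + v) = (fun a v => a + id v) from rfl]
    rw [PySem.List.foldl_add (PySem.Dict.counter L).values id 0,
        PySem.Dict.values_eq_map_keys _ (PySem.Dict.nodup_keys_counter L) 0, List.map_map]
    have : (PySem.Dict.counter L).keys.map (id ∘ fun k => (PySem.Dict.counter L).getD k 0)
        = (PySem.Dict.counter L).keys.map (fun w => (L.count w : Int)) := by
      apply List.map_congr_left
      intro w _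
      simp [PySem.Dict.getD_counter]
    rw [this, PySem.Dict.keys_counter,
        kmer_sum_count L (PySem.Set.ofList L) (PySem.Set.nodup_ofList L)
          (fun w hw => (PySem.Set.mem_ofList L w).mpr hw)]
    simp
  -- A's shared sum
  have hitems : (PySem.Dict.counter Lx).items = Kx.map (fun w => (w, (Lx.count w : Int))) := by
    rw [PySem.Dict.items_counter, hKx]
  have hshared : ((PySem.Dict.counter Lx).items.foldl
      (fun (d : PySem.Dict (List Char) Int) p =>
        if 0 < min p.2 ((PySem.Dict.counter Ly).getD p.1 0) then
          d.insert p.1 (min p.2 ((PySem.Dict.counter Ly).getD p.1 0)) else d)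
      PySem.Dict.empty).values.foldl (· + ·) 0
      = (Kx.map (fun w => min (Lx.count w : Int) (Ly.count w : Int))).sum := by
    rw [show (fun (a v : Int) => a + v) = (fun a v => a + id v) from rfl]
    rw [PySem.List.foldl_add _ id 0, List.map_id, hitems]
    have hfsteq : (Prod.fst ∘ fun w => (w, (Lx.count w : Int))) = (id : List Char → List Char) := rfl
    have hnd : ((Kx.map (fun w => (w, (Lx.count w : Int)))).map Prod.fst).Nodup := by
      rw [List.map_map, hfsteq, List.map_id]
      exact hKxnd
    have hfresh : ∀ p ∈ Kx.map (fun w => (w, (Lx.count w : Int))),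
        (PySem.Dict.empty : PySem.Dict (List Char) Int).contains p.1 = false := by
      intro p _
      simp [PySem.Dict.contains_empty]
    rw [kmer_inter_sum (fun w => (PySem.Dict.counter Ly).getD w 0) _ _ hnd hfresh]
    rw [List.map_map]
    have : Kx.map ((fun p => max 0 (min p.2 ((PySem.Dict.counter Ly).getD p.1 0))) ∘
          fun w => (w, (Lx.count w : Int)))
        = Kx.map (fun w => min (Lx.count w : Int) (Ly.count w : Int)) := by
      apply List.map_congr_left
      intro w _
      simp only [Function.comp, PySem.Dict.getD_counter]
      exact max_eq_right (le_min (Int.natCast_nonneg _) (Int.natCast_nonneg _))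
    rw [this]
    simp [PySem.Dict.values, PySem.Dict.empty]
  rw [hshared, htotal Lx, htotal Ly]
  -- sums over net.keys vs Kx
  have hcovx : ∀ w ∈ Lx, w ∈ net.keys := by
    intro w hw
    rw [hkeysnet]
    exact (PySem.Set.mem_update Kx Ly w).mpr (Or.inl ((PySem.Set.mem_ofList Lx w).mpr hw))
  have hcovy : ∀ w ∈ Ly, w ∈ net.keys := by
    intro w hw
    rw [hkeysnet]
    exact (PySem.Set.mem_update Kx Ly w).mpr (Or.inr hw)
  rw [kmer_sum_count Lx net.keys hnetnd hcovx, kmer_sum_count Ly net.keys hnetnd hcovy]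
  -- extend the min-sum from Kx to net.keys
  have hext : (net.keys.map (fun w => min (Lx.count w : Int) (Ly.count w : Int))).sum
      = (Kx.map (fun w => min (Lx.count w : Int) (Ly.count w : Int))).sum := by
    rw [hkeysnet, PySem.Set.update_eq_append_filter, List.map_append, List.sum_append]
    have hz : ((List.filter (fun w => !Kx.contains w) (PySem.Set.ofList Ly)).map
        (fun w => min (Lx.count w : Int) (Ly.count w : Int))).sum = 0 := by
      apply List.sum_eq_zero
      intro z hz
      rcases List.mem_map.mp hz with ⟨w, hw, rfl⟩
      have hnot : w ∉ Lx := by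
        have := (List.mem_filter.mp hw).2
        intro hmem
        rw [hKx] at this
        simp [(PySem.Set.mem_ofList Lx w).mpr hmem] at this
      rw [List.count_eq_zero.mpr hnot]
      simp
    rw [hz]
    ring
  rw [hext]
  ring

-- ===== VERDICT (by name: the statement is the Claim_ definition above) =====
theorem kmerdistance_spec : Claim_equal_kmerdistance := by
  intro k x y _
  unfold Spec_kmerdistance
  exact kmer_main k x y
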